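-- pv_equiv track=rewrite | github.com/mblsha/binja-esr | sc62015/pysc62015/test_emulator.py | compute_expected_dsrl
-- ===== SOURCE A (Python) =====
-- from typing import Dict, Tuple, List, NamedTuple, Optional
--
-- def compute_expected_dsrl(logical_bcd_bytes: List[int]) -> List[int]:
--     """
--     Computes the result of DSRL operation on BCD bytes.
--     logical_bcd_bytes is [LSB_val, LSB+1_val, ..., MSB_val].
--     e.g., for BCD 123456, input is [0x56, 0x34, 0x12].
--     Result for 123456 -> 012345 is [0x45, 0x23, 0x01].
--     """
--     if not logical_bcd_bytes:
--         return []
--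
--     count = len(logical_bcd_bytes)
--     shifted_bytes = [0] * count
--
--     # u carries the HIGH nibble of the previous (less significant) byte
--     # to become the high nibble of the current (more significant) byte.
--     # For the least significant byte, there's no "previous" byte, so u starts as 0.
--     u_carry_from_prev_high_nibble = 0
--
--     # Iterate from LSB to MSB (index 0 to count-1)
--     for i in range(count):
--         old_current_byte_val = logical_bcd_bytes[i]
--         old_current_high_nibble = (old_current_byte_val >> 4) & 0x0F
--
--         # New byte's low nibble is the old_current_byte's high nibble.
--         # New byte's high nibble is u (which was the HIGH nibble of the previous byte).
--         shifted_bytes[i] = old_current_high_nibble | (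
--             u_carry_from_prev_high_nibble << 4
--         )
--
--         # Update u for the next iteration using the high nibble of the current byte
--         u_carry_from_prev_high_nibble = old_current_high_nibble
--
--     return shifted_bytes
-- ===== SOURCE B (Python) =====
-- def compute_expected_dsrl(logical_bcd_bytes):
--     n = len(logical_bcd_bytes)
--     H = int.from_bytes(bytes(((b >> 4) & 0x0F) for b in logical_bcd_bytes), 'little')
--     R = H + (H * 4096) % (256 ** n)
--     return list(R.to_bytes(n, 'little'))
-- ===== Notes on version B (the rewrite author's own statement) =====
-- stated objective: alternative
-- what changed: Replaces A's per-byte loop with a threaded nibble carry by whole-number arithmetic: the high nibbles are packed into one base-256 integer H (int.from_bytes), the entire BCD shift is done in one arithmetic step R = H + (H*4096) % 256**n, and R is decoded back into the byte list (int.to_bytes).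
import Mathlib
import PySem

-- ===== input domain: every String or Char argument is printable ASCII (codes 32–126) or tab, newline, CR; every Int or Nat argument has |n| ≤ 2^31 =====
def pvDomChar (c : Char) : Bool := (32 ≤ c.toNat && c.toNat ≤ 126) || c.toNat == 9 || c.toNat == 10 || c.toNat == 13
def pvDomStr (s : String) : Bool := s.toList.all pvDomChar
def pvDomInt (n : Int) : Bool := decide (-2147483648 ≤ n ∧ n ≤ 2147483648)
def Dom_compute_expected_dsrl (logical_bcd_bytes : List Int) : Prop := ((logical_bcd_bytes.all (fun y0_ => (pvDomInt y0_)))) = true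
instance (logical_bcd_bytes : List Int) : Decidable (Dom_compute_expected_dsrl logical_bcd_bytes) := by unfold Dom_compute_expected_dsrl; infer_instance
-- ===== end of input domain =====

-- B replaces A's per-byte loop with a threaded nibble carry by whole-number arithmetic
-- (pack the high nibbles into one base-256 integer, do the whole shift in one arithmetic step,
-- decode back into bytes); same return value, different algorithm.

-- ===== PORT A =====
-- one loop step: reads xs[i], writes shifted[i], updates the carry (state = (shifted_bytes, u_carry))
def dsrlStepA (xs : List Int) (st : List Int × Int) (i : Int) : List Int × Int :=
  let old_current_byte_val := PySem.List.pyGetD xs i 0   -- i is always in range here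
  let old_current_high_nibble := PySem.Int.band (old_current_byte_val >>> 4) 15
  (PySem.List.pySetD st.1 i (PySem.Int.bor old_current_high_nibble (st.2 <<< 4)),
   old_current_high_nibble)

def compute_expected_dsrl (logical_bcd_bytes : List Int) : List Int :=
  if logical_bcd_bytes = [] then []
  else
    let count : Int := logical_bcd_bytes.length
    let shifted_bytes : List Int := List.replicate logical_bcd_bytes.length 0
    let st := (PySem.List.pyRange 0 count 1).foldl (dsrlStepA logical_bcd_bytes) (shifted_bytes, 0)
    st.1

-- ===== PORT B =====
-- int.from_bytes(nibs, 'little') is ported by hand, step for step, as the exact fold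
-- a*256 + digit over the reversed digit list; 256 ** n is ported as Nat-exponent pow
-- (exact since n = len(xs) ≥ 0); list(R.to_bytes(n, 'little')) is ported by hand as the
-- exact n-step little-endian decode appending R % 256 and floor-dividing R by 256.
def compute_expected_dsrl_alt (logical_bcd_bytes : List Int) : List Int :=
  let nibs := logical_bcd_bytes.map (fun (b : Int) => PySem.Int.band (b >>> 4) 15)
  let H := nibs.reverse.foldl (fun (a c : Int) => a * 256 + c) 0
  let R := H + PySem.Int.mod (H * 4096) ((256 : Int) ^ logical_bcd_bytes.length)
  (logical_bcd_bytes.foldl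
    (fun (st : List Int × Int) _ =>
      (st.1 ++ [PySem.Int.mod st.2 256], PySem.Int.floordiv st.2 256))
    ([], R)).1

-- ===== PRECONDITION & SPEC =====
def Spec_compute_expected_dsrl (logical_bcd_bytes : List Int) (out : List Int) : Prop := out = compute_expected_dsrl_alt logical_bcd_bytes
instance (logical_bcd_bytes : List Int) (out : List Int) : Decidable (Spec_compute_expected_dsrl logical_bcd_bytes out) := by unfold Spec_compute_expected_dsrl; infer_instance

-- ===== CLAIM (what is proved, stated in full; the proofs are below) =====
def Claim_equal_compute_expected_dsrl : Prop := ∀ (logical_bcd_bytes : List Int), Dom_compute_expected_dsrl logical_bcd_bytes → Spec_compute_expected_dsrl logical_bcd_bytes (compute_expected_dsrl logical_bcd_bytes)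

-- ===== LEMMAS AND PROOFS =====

-- the high nibble of a byte, as A and B both compute it
def pvNib (b : Int) : Int := PySem.Int.band (b >>> 4) 15

-- the common value both programs compute: shifted bytes of xs with incoming carry u
def dsrlSpec (u : Int) : List Int → List Int
  | [] => []
  | b :: rest =>
      let h := pvNib b
      PySem.Int.bor h (u <<< 4) :: dsrlSpec h rest

lemma pvNib_bounds (b : Int) : 0 ≤ pvNib b ∧ pvNib b < 16 := by
  unfold pvNib PySem.Int.band
  split_ifs with h1 h2 h3
  · have := Nat.and_le_right (n := (b >>> 4).toNat) (m := (15 : Int).toNat); omega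
  · omega
  · have : (15 : Int).toNat &&& (-(b >>> 4) - 1).toNat ≤ (15 : Int).toNat := Nat.and_le_left
    omega
  · omega

-- bitwise-or of a nibble with a nibble shifted left four IS nibble-packing arithmetic
lemma bor_nib (h u : Int) (hh0 : 0 ≤ h) (hh : h < 16) (hu0 : 0 ≤ u) (hu : u < 16) :
    PySem.Int.bor h (u <<< 4) = h + 16 * u := by
  interval_cases h <;> interval_cases u <;> decide

-- floor-mod and floor-div against a positive modulus are determined by a quotient/remainder split
lemma pv_divmod_unique (a b k r : Int) (hb : 0 < b) (h0 : 0 ≤ r) (hr : r < b)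
    (h : a = b * k + r) : PySem.Int.mod a b = r ∧ PySem.Int.floordiv a b = k := by
  have h1 := PySem.Int.floordiv_mul_add_mod a b
  have h2 := PySem.Int.mod_nonneg a hb
  have h3 := PySem.Int.mod_lt a hb
  have hd : b ∣ (PySem.Int.mod a b - r) :=
    ⟨k - PySem.Int.floordiv a b, by linear_combination h1 + h⟩
  have hz : PySem.Int.mod a b - r = 0 := by
    refine Int.eq_zero_of_abs_lt_dvd hd ?_
    rw [abs_lt]; omega
  have hm : PySem.Int.mod a b = r := by omega
  refine ⟨hm, ?_⟩
  have h4 : PySem.Int.floordiv a b * b = k * b := by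
    linear_combination h1 + h - hm
  exact mul_right_cancel₀ (by omega) h4

-- the packed-nibble integer of xs, LSB first
def pvNval : List Int → Int
  | [] => 0
  | b :: t => pvNib b + 256 * pvNval t

lemma pv_encode_foldl (xs : List Int) : ∀ a : Int,
    ((xs.map (fun (b : Int) => PySem.Int.band (b >>> 4) 15)).reverse.foldl
        (fun (a c : Int) => a * 256 + c) a)
      = a * 256 ^ xs.length + pvNval xs := by
  induction xs with
  | nil => intro a; simp [pvNval]
  | cons b t ih =>
      intro a
      rw [List.map_cons, List.reverse_cons, List.foldl_append]
      simp only [List.foldl_cons, List.foldl_nil]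
      rw [ih a]
      simp only [pvNval, pvNib, List.length_cons, pow_succ]
      ring

-- the big-integer value B holds after the shift, generalized to an incoming nibble carry u
def pvFval (u : Int) (xs : List Int) : Int :=
  pvNval xs + PySem.Int.mod (u * 16 + pvNval xs * 4096) ((256 : Int) ^ xs.length)

lemma pvFval_cons (b : Int) (t : List Int) (u : Int) (hu0 : 0 ≤ u) (hu : u < 16) :
    pvFval u (b :: t) = (pvNib b + 16 * u) + 256 * pvFval (pvNib b) t := by
  have hP : (0 : Int) < 256 ^ t.length := by positivity
  have hY0 := PySem.Int.mod_nonneg (pvNib b * 16 + pvNval t * 4096) hP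
  have hYlt := PySem.Int.mod_lt (pvNib b * 16 + pvNval t * 4096) hP
  have hsplit := PySem.Int.floordiv_mul_add_mod (pvNib b * 16 + pvNval t * 4096) ((256 : Int) ^ t.length)
  set Y := PySem.Int.mod (pvNib b * 16 + pvNval t * 4096) ((256 : Int) ^ t.length) with hY
  set q := PySem.Int.floordiv (pvNib b * 16 + pvNval t * 4096) ((256 : Int) ^ t.length) with hq
  have hmod : PySem.Int.mod (u * 16 + pvNval (b :: t) * 4096) ((256 : Int) ^ (b :: t).length)
      = 16 * u + 256 * Y := by
    refine (pv_divmod_unique _ _ q (16 * u + 256 * Y) (by positivity) (by omega) ?_ ?_).1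
    · simp only [List.length_cons, pow_succ]
      have hPge : (0 : Int) < 256 ^ t.length := hP
      generalize h256 : (256 : Int) ^ t.length = P at hYlt hPge ⊢
      omega
    · simp only [pvNval, List.length_cons, pow_succ]
      linear_combination (-256 : Int) * hsplit
  simp only [pvFval]
  rw [hmod, ← hY]
  simp only [pvNval]
  ring

-- B's decode loop peels bytes off the shifted big integer and yields exactly dsrlSpec
lemma pv_decode_loop (xs : List Int) : ∀ (u : Int) (acc : List Int), 0 ≤ u → u < 16 →
    (xs.foldl
      (fun (st : List Int × Int) _ =>
        (st.1 ++ [PySem.Int.mod st.2 256], PySem.Int.floordiv st.2 256))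
      (acc, pvFval u xs)).1 = acc ++ dsrlSpec u xs := by
  induction xs with
  | nil => intro u acc _ _; simp [dsrlSpec]
  | cons b t ih =>
      intro u acc hu0 hu
      have hb := pvNib_bounds b
      have hF := pvFval_cons b t u hu0 hu
      have hdm := pv_divmod_unique (pvFval u (b :: t)) 256 (pvFval (pvNib b) t)
        (pvNib b + 16 * u) (by norm_num) (by omega) (by omega) (by linarith [hF])
      simp only [List.foldl_cons, hdm.1, hdm.2]
      rw [ih (pvNib b) (acc ++ [pvNib b + 16 * u]) hb.1 hb.2]
      simp only [dsrlSpec, List.append_assoc, List.singleton_append]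
      rw [bor_nib (pvNib b) u hb.1 hb.2 hu0 hu]

-- B computes dsrlSpec 0
lemma pv_alt_eq (xs : List Int) : compute_expected_dsrl_alt xs = dsrlSpec 0 xs := by
  unfold compute_expected_dsrl_alt
  dsimp only []
  rw [pv_encode_foldl xs 0]
  have hR : (0 : Int) * 256 ^ xs.length + pvNval xs
        + PySem.Int.mod ((0 * 256 ^ xs.length + pvNval xs) * 4096) ((256 : Int) ^ xs.length)
      = pvFval 0 xs := by
    simp [pvFval]
  simp only [hR]
  exact pv_decode_loop xs 0 [] le_rfl (by norm_num)

-- A's indexed loop fills the output array with dsrlSpec, one slot per iteration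
lemma dsrl_loopA (xs : List Int) :
    ∀ (m k : Nat) (acc : List Int) (u : Int), m = xs.length - k → k ≤ xs.length →
      acc.length = xs.length →
      ((PySem.List.pyRange k xs.length 1).foldl (dsrlStepA xs) (acc, u)).1
        = acc.take k ++ dsrlSpec u (xs.drop k) := by
  intro m
  induction m with
  | zero =>
      intro k acc u hm hk hlen
      have hk' : k = xs.length := by omega
      rw [PySem.List.pyRange_one_eq_nil (by exact_mod_cast le_of_eq hk'.symm)]
      simp [hk', hlen, List.take_of_length_le, dsrlSpec]
  | succ m ih =>
      intro k acc u hm hk hlen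
      have hklt : k < xs.length := by omega
      rw [PySem.List.pyRange_one_cons (by exact_mod_cast hklt)]
      simp only [List.foldl_cons]
      have hstep : dsrlStepA xs (acc, u) (k : Int)
          = (acc.set k (PySem.Int.bor (PySem.Int.band (xs[k] >>> 4) 15) (u <<< 4)),
             PySem.Int.band (xs[k] >>> 4) 15) := by
        simp [dsrlStepA, PySem.List.pyGetD_natCast, PySem.List.pySetD_natCast,
          List.getElem?_eq_getElem hklt]
      have hcast : ((k : Int) + 1) = ((k + 1 : Nat) : Int) := by push_cast; ring
      rw [hstep, hcast, ih (k + 1) _ _ (by omega) (by omega) (by simp [hlen])]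
      have hdrop : xs.drop k = xs[k] :: xs.drop (k + 1) := (List.getElem_cons_drop hklt).symm
      rw [hdrop]
      simp only [dsrlSpec, pvNib]
      rw [List.take_add_one]
      have hts : (acc.set k (PySem.Int.bor (PySem.Int.band (xs[k] >>> 4) 15) (u <<< 4))).take k
          = acc.take k := by
        apply List.ext_getElem
        · simp [hlen]
        · intro i h1 h2
          have hik : i < k := by simp [hlen] at h1; omega
          simp only [List.getElem_take]
          apply List.getElem_set_ne
          omega
      rw [hts]
      simp [hlen, hklt, Option.toList]

-- ===== VERDICT (by name: the statement is the Claim_ definition above) =====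
theorem compute_expected_dsrl_spec : Claim_equal_compute_expected_dsrl := by
  intro xs _
  show compute_expected_dsrl xs = compute_expected_dsrl_alt xs
  rw [pv_alt_eq]
  by_cases hxs : xs = []
  · subst hxs; rfl
  · have h0 := dsrl_loopA xs xs.length 0 (List.replicate xs.length 0) 0
      (by omega) (by omega) (by simp)
    simp only [Nat.cast_zero, List.take_zero, List.drop_zero, List.nil_append] at h0
    simp only [compute_expected_dsrl, if_neg hxs]
    exact h0
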